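-- pv_equiv track=rewrite | github.com/rowansci/stjames-public | stjames/atomium_stjames/pdb.py | get_full_names
-- ===== SOURCE A (Python) =====
-- from typing import Any, Callable, TypedDict
--
-- def get_full_names(pdb_dict: dict[str, Any]) -> dict[str, Any]:
--     """Creates a mapping of het names to full English names.
--
--     :param pdb_dict: the .pdb dict to read.
--     :rtype: ``dict``"""
--
--     full_names: dict[str, Any] = {}
--     for line in pdb_dict.get("HETNAM", []):
--         try:
--             full_names[line[11:14].strip()] += line[15:].strip()
--         except Exception:
--             full_names[line[11:14].strip()] = line[15:].strip()
--
--     return full_names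
-- ===== SOURCE B (Python) =====
-- def get_full_names(pdb_dict):
--     """Creates a mapping of het names to full English names.
--
--     :param pdb_dict: the .pdb dict to read.
--     :rtype: ``dict``"""
--
--     lines = pdb_dict.get("HETNAM", [])
--     # Pass 1: het codes in order of first appearance.
--     hets = []
--     for line in lines:
--         het = line[11:14].strip()
--         if het not in hets:
--             hets.append(het)
--     # Pass 2: for each het, gather its name fragments by scanning the lines.
--     return {het: "".join(line[15:].strip() for line in lines
--                          if line[11:14].strip() == het)
--             for het in hets}
-- ===== Notes on version B (the rewrite author's own statement) =====
-- stated objective: alternative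
-- what changed: Replaces A's single-pass dict with try/except string accumulation by a dict-free two-stage group-by: pass 1 collects het codes in first-appearance order, pass 2 builds each full name by scanning the lines for that code and joining its fragments.
import Mathlib
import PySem

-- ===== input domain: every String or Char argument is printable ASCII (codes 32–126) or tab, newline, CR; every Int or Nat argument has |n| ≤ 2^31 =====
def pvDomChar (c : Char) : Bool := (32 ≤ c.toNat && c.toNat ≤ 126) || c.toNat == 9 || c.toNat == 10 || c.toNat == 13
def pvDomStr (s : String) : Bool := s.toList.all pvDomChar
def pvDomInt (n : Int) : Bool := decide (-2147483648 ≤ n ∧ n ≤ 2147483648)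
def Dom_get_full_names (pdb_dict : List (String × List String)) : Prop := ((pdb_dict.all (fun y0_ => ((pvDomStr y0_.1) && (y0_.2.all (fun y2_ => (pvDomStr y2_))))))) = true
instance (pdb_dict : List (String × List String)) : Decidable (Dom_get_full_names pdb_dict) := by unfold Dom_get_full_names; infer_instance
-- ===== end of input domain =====

-- B replaces A's dict with try/except string accumulation by a dict-free two-stage group-by
-- (collect het codes in first-appearance order, then join each code's fragments by scanning
-- the lines); same return value, a genuinely different algorithm of similar cost.

-- ===== PORT A =====
-- A: for each HETNAM line, try full_names[key] += frag; except: full_names[key] = frag.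
def get_full_names (pdb_dict : List (String × List String)) : List (String × String) :=
  ((((PySem.Dict.mk pdb_dict).getD "HETNAM" []).foldl
    (fun d line =>
      match d.get? (PySem.Str.strip (PySem.Str.slice line (some 11) (some 14))) with
      | some v => d.insert (PySem.Str.strip (PySem.Str.slice line (some 11) (some 14)))
          (v ++ PySem.Str.strip (PySem.Str.slice line (some 15) none))
      | none => d.insert (PySem.Str.strip (PySem.Str.slice line (some 11) (some 14)))
          (PySem.Str.strip (PySem.Str.slice line (some 15) none)))
    (PySem.Dict.empty : PySem.Dict String String)).items)

-- ===== PORT B =====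
-- B: pass 1 collects het codes in first-appearance order ('if het not in hets: hets.append');
--    pass 2 builds {het: "".join(frag for line in lines if key == het)} by rescanning lines.
-- pass 1: het codes in first-appearance order
def pvHets (lines : List String) : List String :=
  lines.foldl
    (fun ks line =>
      if ks.contains (PySem.Str.strip (PySem.Str.slice line (some 11) (some 14))) then ks
      else ks ++ [PySem.Str.strip (PySem.Str.slice line (some 11) (some 14))])
    ([] : List String)

-- pass 2: the dict comprehension over the collected het codes
def get_full_names_alt (pdb_dict : List (String × List String)) : List (String × String) :=
  (pvHets ((PySem.Dict.mk pdb_dict).getD "HETNAM" [])).map (fun het =>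
    (het, PySem.Str.join ""
      ((((PySem.Dict.mk pdb_dict).getD "HETNAM" []).filter
          (fun line => PySem.Str.strip (PySem.Str.slice line (some 11) (some 14)) == het)).map
        (fun line => PySem.Str.strip (PySem.Str.slice line (some 15) none)))))

-- ===== PRECONDITION & SPEC =====
def Spec_get_full_names (pdb_dict : List (String × List String)) (out : List (String × String)) : Prop := out = get_full_names_alt pdb_dict
instance (pdb_dict : List (String × List String)) (out : List (String × String)) : Decidable (Spec_get_full_names pdb_dict out) := by unfold Spec_get_full_names; infer_instance

-- ===== CLAIM (what is proved, stated in full; the proofs are below) =====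
def Claim_equal_get_full_names : Prop := ∀ (pdb_dict : List (String × List String)), Dom_get_full_names pdb_dict → Spec_get_full_names pdb_dict (get_full_names pdb_dict)

-- ===== LEMMAS AND PROOFS =====

theorem pvChars_join_nil (xs : List (List Char)) :
    PySem.Chars.join [] xs = xs.flatten := by
  induction xs with
  | nil => simp [PySem.Chars.join, List.intercalate]
  | cons a t ih =>
    cases t with
    | nil => simp [PySem.Chars.join, List.intercalate]
    | cons b r =>
      rw [PySem.Chars.join_cons_cons, ih]
      simp

theorem pvJoin_append_singleton (l : List String) (s : String) :
    PySem.Str.join "" (l ++ [s]) = PySem.Str.join "" l ++ s := by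
  simp [PySem.Str.join, pvChars_join_nil]

theorem pvJoin_singleton (s : String) : PySem.Str.join "" [s] = s := by
  simp [PySem.Str.join]

-- B's pass-1 fold is exactly set(...) in first-appearance order
theorem pvKeys_eq (key : String → String) (lines : List String) :
    lines.foldl (fun ks line => if ks.contains (key line) then ks else ks ++ [key line])
      ([] : List String)
    = PySem.Set.ofList (lines.map key) := by
  rw [PySem.Set.ofList_eq_foldl, List.foldl_map]
  rfl

-- get? of a dict whose items list keys of K with value g k
theorem pvGet?_tab (K : List String) (g : String → String) (x : String) :
    (PySem.Dict.mk (K.map (fun k => (k, g k)))).get? x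
    = if x ∈ K then some (g x) else none := by
  induction K with
  | nil => simp [PySem.Dict.get?]
  | cons a t ih =>
    simp only [List.map_cons, PySem.Dict.get?_mk_cons, List.mem_cons]
    by_cases h : a = x
    · simp [h]
    · have : (a == x) = false := by simp [h]
      simp only [this, Bool.false_eq_true, if_false, ih]
      have : x = a ↔ False := by constructor <;> intro hh <;> simp_all
      simp [this]

-- the main invariant: A's dict fold, read off as items, is B's group-by
theorem pvMain (key frag : String → String) (lines : List String) :
    (lines.foldl
      (fun d line =>
        match d.get? (key line) with
        | some v => d.insert (key line) (v ++ frag line)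
        | none => d.insert (key line) (frag line))
      (PySem.Dict.empty : PySem.Dict String String)).items
    = (PySem.Set.ofList (lines.map key)).map (fun k =>
        (k, PySem.Str.join "" ((lines.filter (fun l => key l == k)).map frag))) := by
  induction lines using List.reverseRecOn with
  | nil => rfl
  | append_singleton rest l ih =>
    set x := key l with hx
    have hnd : (PySem.Set.ofList (rest.map key)).Nodup := PySem.Set.nodup_ofList _
    set K := PySem.Set.ofList (rest.map key) with hK
    set g : String → String :=
      (fun k => PySem.Str.join "" ((rest.filter (fun l => key l == k)).map frag)) with hg
    set d := rest.foldl
      (fun d line =>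
        match d.get? (key line) with
        | some v => d.insert (key line) (v ++ frag line)
        | none => d.insert (key line) (frag line))
      (PySem.Dict.empty : PySem.Dict String String) with hd
    have hitems : d.items = K.map (fun k => (k, g k)) := ih
    have hdmk : d = PySem.Dict.mk (K.map (fun k => (k, g k))) := by
      apply PySem.Dict.ext; simpa [PySem.Dict.items] using hitems
    have hget : ∀ y, d.get? y = if y ∈ K then some (g y) else none := by
      intro y; rw [hdmk]; exact pvGet?_tab K g y
    -- keys of the extended list
    have hK' : PySem.Set.ofList ((rest ++ [l]).map key)
        = if K.contains x then K else K ++ [x] := by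
      rw [List.map_append, PySem.Set.ofList_eq_foldl, List.foldl_append,
        ← PySem.Set.ofList_eq_foldl]
      rfl
    -- filters of the extended list
    have hfilt : ∀ k, (rest ++ [l]).filter (fun l' => key l' == k)
        = rest.filter (fun l' => key l' == k) ++ (if x == k then [l] else []) := by
      intro k
      rw [List.filter_append]
      by_cases h : key l = k
      · have hb : (key l == k) = true := by simp [h]
        simp [List.filter, hx, hb]
      · have hb : (key l == k) = false := by simp [h]
        simp [List.filter, hx, hb]
    have hg' : ∀ k, k ≠ x →
        PySem.Str.join "" (((rest ++ [l]).filter (fun l' => key l' == k)).map frag) = g k := by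
      intro k hk
      rw [hfilt k]
      have : (x == k) = false := by simp [Ne.symm hk]
      simp [this, hg]
    rw [List.foldl_append, List.foldl_cons, List.foldl_nil, ← hd, hK']
    by_cases hc : x ∈ K
    · have hcb : K.contains x = true := by simpa using hc
      have hgl : d.get? x = some (g x) := by rw [hget]; simp [hc]
      simp only [hcb, if_true, ← hx, hgl]
      have hci : d.contains x = true := by
        rw [PySem.Dict.contains_eq_isSome_get?, hgl]; rfl
      rw [PySem.Dict.items_insert, hci, if_pos rfl, hitems, List.map_map]
      apply List.map_congr_left
      intro k hkK
      by_cases hkx : k = x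
      · have hbe : ((k, g k).1 == x) = true := by simp [hkx]
        have hval : PySem.Str.join "" (((rest ++ [l]).filter (fun l' => key l' == k)).map frag)
            = g k ++ frag l := by
          rw [hfilt k]
          have hxk : (x == k) = true := by simp [hkx]
          simp [hxk, pvJoin_append_singleton, hg]
        simp only [Function.comp_apply, if_pos hbe, Prod.mk.injEq]
        exact ⟨by simp [hkx], by rw [hval, hkx]⟩
      · have hne : ¬ (((k, g k).1 == x) = true) := by simp [hkx]
        simp only [Function.comp_apply, if_neg hne, Prod.mk.injEq]
        exact ⟨trivial, (hg' k hkx).symm⟩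
    · have hcb : K.contains x = false := by simpa using hc
      have hgl : d.get? x = none := by rw [hget]; simp [hc]
      simp only [hcb, Bool.false_eq_true, if_false, ← hx, hgl]
      have hci : d.contains x = false := by
        rw [PySem.Dict.contains_eq_isSome_get?, hgl]; rfl
      rw [PySem.Dict.items_insert, hci, if_neg (by simp), hitems, List.map_append]
      congr 1
      · apply List.map_congr_left
        intro k hkK
        have hkx : k ≠ x := fun h => hc (h ▸ hkK)
        simp only [Prod.mk.injEq]
        exact ⟨trivial, (hg' k hkx).symm⟩
      · -- the fresh key: no line of rest has this key, so its fragments are just frag l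
        have hempty : rest.filter (fun l' => key l' == x) = [] := by
          rw [List.filter_eq_nil_iff]
          intro a ha
          have : key a ∈ rest.map key := List.mem_map_of_mem ha
          have hmem : key a ∈ K := by
            rw [hK]; exact (PySem.Set.mem_ofList _ _).mpr this
          simp only [beq_iff_eq]
          intro h; exact hc (h ▸ hmem)
        have hfr : PySem.Str.join "" (((rest ++ [l]).filter (fun l' => key l' == x)).map frag)
            = frag l := by
          rw [hfilt x, hempty]
          simp [pvJoin_singleton]
        simp only [List.map_cons, List.map_nil, List.cons.injEq, Prod.mk.injEq, and_true]
        exact ⟨trivial, hfr.symm⟩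

-- ===== VERDICT (by name: the statement is the Claim_ definition above) =====
theorem get_full_names_spec : Claim_equal_get_full_names := by
  intro pdb_dict _
  unfold Spec_get_full_names get_full_names get_full_names_alt pvHets
  rw [pvKeys_eq
    (fun line => PySem.Str.strip (PySem.Str.slice line (some 11) (some 14)))
    ((PySem.Dict.mk pdb_dict).getD "HETNAM" [])]
  exact pvMain
    (fun line => PySem.Str.strip (PySem.Str.slice line (some 11) (some 14)))
    (fun line => PySem.Str.strip (PySem.Str.slice line (some 15) none))
    ((PySem.Dict.mk pdb_dict).getD "HETNAM" [])
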